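-- pv_equiv track=rewrite | github.com/MartinThoma/algorithms | randpfade.py | f
-- ===== SOURCE A (Python) =====
-- def f(m, n):
--     """
--     Parameters
--     ----------
--     m : int
--     n : int
--
--     Returns
--     -------
--     int
--     """
--     if m == 0:
--         return 2
--     else:
--         sum_ = 3*f(m-1, n)
--         i = 2
--         while m-i >= 0:
--             sum_ += (-1)**(i+1) * f(m-i, n)
--             i += 1
--         sum_ += ((-1)**(n % 2))*(m % 2)
--         return sum_
-- ===== SOURCE B (Python) =====
-- def f(m, n):
--     # Bottom-up: prev = a(k), p2 = alternating prefix sum of a(0..k-1); O(m) instead of exponential recursion.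
--     s = 1 if n % 2 == 0 else -1
--     prev = 2
--     p2 = 0
--     for k in range(1, m + 1):
--         cur = 3 * prev + (p2 if k % 2 == 1 else -p2) + s * (k % 2)
--         p2 = p2 + (prev if k % 2 == 1 else -prev)
--         prev = cur
--     return prev
-- ===== Notes on version B (the rewrite author's own statement) =====
-- stated objective: faster
-- what changed: Replaced A's exponential branching recursion (each call re-recursing on every smaller m) by a single bottom-up loop over k = 1..m that keeps only the previous value and an alternating prefix sum of all earlier values.
import Mathlib
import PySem

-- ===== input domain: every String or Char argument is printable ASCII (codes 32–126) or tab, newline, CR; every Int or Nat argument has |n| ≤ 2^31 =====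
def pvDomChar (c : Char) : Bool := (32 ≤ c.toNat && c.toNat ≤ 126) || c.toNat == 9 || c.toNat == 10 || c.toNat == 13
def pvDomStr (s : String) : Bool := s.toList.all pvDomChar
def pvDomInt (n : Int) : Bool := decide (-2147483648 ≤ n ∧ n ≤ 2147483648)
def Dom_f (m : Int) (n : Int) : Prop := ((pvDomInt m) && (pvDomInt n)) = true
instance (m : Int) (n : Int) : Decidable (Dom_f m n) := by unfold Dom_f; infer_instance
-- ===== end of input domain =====

-- B replaces A's exponential mutual recursion by one bottom-up pass keeping the previous
-- value and an alternating prefix sum (objective: faster, asymptotic).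

-- ===== PORT A =====
-- A recurses on m; transliterated on the non-negative recursion depth m.toNat
-- (A never terminates for m < 0, excluded by Pre_f). The while loop over i = 2 .. m
-- is the fold over List.range' 2 (m-1), i.e. [2, …, m].
def fA (m : Nat) (n : Int) : Int :=
  if _h : m = 0 then 2
  else
    3 * fA (m - 1) n
      + ((List.range' 2 (m - 1)).attach.foldl
          (fun s i => s + (-1 : Int) ^ (i.1 + 1) * fA (m - i.1) n) 0)
      + (-1 : Int) ^ (PySem.Int.mod n 2).toNat * PySem.Int.mod (m : Int) 2
termination_by m
decreasing_by
  · exact Nat.sub_lt (Nat.pos_of_ne_zero _h) Nat.one_pos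
  · exact Nat.sub_lt (Nat.pos_of_ne_zero _h)
      (Nat.lt_of_lt_of_le Nat.zero_lt_two (List.mem_range'_1.mp i.2).1)

def f (m : Int) (n : Int) : Int := fA m.toNat n

-- ===== PORT B =====
def f_alt (m : Int) (n : Int) : Int :=
  let s : Int := if PySem.Int.mod n 2 = 0 then 1 else -1
  let r := (PySem.List.pyRange 1 (m + 1) 1).foldl
    (fun (st : Int × Int) k =>
      (3 * st.1 + (if PySem.Int.mod k 2 = 1 then st.2 else -st.2) + s * PySem.Int.mod k 2,
       st.2 + (if PySem.Int.mod k 2 = 1 then st.1 else -st.1)))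
    (2, 0)
  r.1

-- ===== PRECONDITION & SPEC =====
-- Pre_f excludes m < 0, on which A's recursion m ↦ m-1 never reaches the base case
-- and Python raises RecursionError.
def Pre_f (m : Int) (n : Int) : Prop := 0 ≤ m
instance (m : Int) (n : Int) : Decidable (Pre_f m n) := by unfold Pre_f; infer_instance
def pvWitness_f : Int × Int := (4, 3)

def Spec_f (m : Int) (n : Int) (out : Int) : Prop := out = f_alt m n
instance (m : Int) (n : Int) (out : Int) : Decidable (Spec_f m n out) := by unfold Spec_f; infer_instance

-- ===== CLAIM (what is proved, stated in full; the proofs are below) =====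
def Claim_equal_f : Prop := ∀ (m : Int) (n : Int), Dom_f m n → Pre_f m n → Spec_f m n (f m n)

-- ===== LEMMAS AND PROOFS =====

-- Ps k n = Σ_{j<k} (-1)^j · fA j n : the alternating prefix sum B maintains.
def Ps : Nat → Int → Int
  | 0, _ => 0
  | k+1, n => Ps k n + (-1 : Int) ^ k * fA k n

theorem neg_one_pow_ite (k : Nat) : (-1 : Int) ^ k = if k % 2 = 0 then 1 else -1 := by
  rcases Nat.even_or_odd k with h | h
  · simp [h.neg_one_pow, Nat.even_iff.mp h]
  · simp [h.neg_one_pow, Nat.odd_iff.mp h]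

theorem pvNegOnePowCongr {a b : Nat} (h : a % 2 = b % 2) : (-1 : Int) ^ a = (-1 : Int) ^ b := by
  rw [neg_one_pow_ite, neg_one_pow_ite, h]

theorem foldl_attach_gen (g : Int → Nat → Int) : ∀ (l : List Nat) (b : Int),
    l.attach.foldl (fun s i => g s i.1) b = l.foldl g b := by
  intro l
  induction l with
  | nil => intro b; rfl
  | cons x xs ih => intro b; simp [List.attach_cons, List.foldl_map, ih]

theorem foldl_add_eq (g : Nat → Int) (l : List Nat) (a : Int) :
    l.foldl (fun s i => s + g i) a = a + (l.map g).sum := by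
  induction l generalizing a with
  | nil => simp
  | cons x xs ih => simp [List.foldl_cons, ih, add_assoc]

theorem sum_shift (n : Int) (m : Nat) :
    ∀ c, c ≤ m - 1 → 2 ≤ m →
      ((List.range' 2 c).map (fun i => (-1 : Int) ^ (i + 1) * fA (m - i) n)).sum
        = (-1 : Int) ^ (m + 1) * (Ps (m - 1) n - Ps (m - 1 - c) n) := by
  intro c
  induction c with
  | zero => intro _ _; simp
  | succ c ih =>
    intro hc hm
    rw [List.range'_concat, List.map_append, List.sum_append, ih (by omega) hm]
    have h1 : m - 1 - c = (m - 1 - (c + 1)) + 1 := by omega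
    have h2 : Ps (m - 1 - c) n
        = Ps (m - 1 - (c + 1)) n + (-1 : Int) ^ (m - 1 - (c + 1)) * fA (m - 1 - (c + 1)) n := by
      rw [h1]; rfl
    have h3 : m - (2 + c) = m - 1 - (c + 1) := by omega
    have h4 : (-1 : Int) ^ (2 + c + 1) = (-1 : Int) ^ (m + 1) * (-1 : Int) ^ (m - 1 - (c + 1)) := by
      rw [← pow_add]; exact pvNegOnePowCongr (by omega)
    rw [h2]
    simp only [List.map_cons, List.map_nil, List.sum_cons, List.sum_nil, add_zero]
    simp only [one_mul]
    rw [h3, h4]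
    ring

-- the recurrence A satisfies, phrased with the alternating prefix sum
theorem fA_rec (m : Nat) (n : Int) (h : 1 ≤ m) :
    fA m n = 3 * fA (m - 1) n + (-1 : Int) ^ (m + 1) * Ps (m - 1) n
      + (-1 : Int) ^ (PySem.Int.mod n 2).toNat * PySem.Int.mod (m : Int) 2 := by
  rw [fA]
  simp only [dif_neg (by omega : ¬ m = 0)]
  congr 2
  rw [foldl_attach_gen (fun s i => s + (-1 : Int) ^ (i + 1) * fA (m - i) n), foldl_add_eq, zero_add]
  rcases Nat.lt_or_ge m 2 with hm | hm
  · have : m = 1 := by omega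
    subst this; simp [Ps]
  · rw [sum_shift n m (m - 1) le_rfl hm]
    simp [Ps]

theorem sg_eq (n : Int) :
    (-1 : Int) ^ (PySem.Int.mod n 2).toNat = if PySem.Int.mod n 2 = 0 then 1 else -1 := by
  have h0 := PySem.Int.mod_nonneg n (b := 2) (by omega)
  have h1 := PySem.Int.mod_lt n (b := 2) (by omega)
  interval_cases h : PySem.Int.mod n 2 <;> simp

theorem loop_inv (n : Int) (k : Nat) :
    (PySem.List.pyRange 1 ((k : Int) + 1) 1).foldl
      (fun (st : Int × Int) i =>
        (3 * st.1 + (if PySem.Int.mod i 2 = 1 then st.2 else -st.2)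
            + (if PySem.Int.mod n 2 = 0 then (1 : Int) else -1) * PySem.Int.mod i 2,
         st.2 + (if PySem.Int.mod i 2 = 1 then st.1 else -st.1)))
      (2, 0)
    = (fA k n, Ps k n) := by
  induction k with
  | zero =>
    rw [PySem.List.pyRange_one_eq_nil (by omega)]
    simp [fA, Ps]
  | succ k ih =>
    have hsplit : PySem.List.pyRange 1 ((k : Int) + 1 + 1) 1
        = PySem.List.pyRange 1 ((k : Int) + 1) 1 ++ [(k : Int) + 1] := by
      have := PySem.List.pyRange_one_succ_right (a := 1) (b := (k : Int) + 1) (by omega)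
      simpa using this
    push_cast
    rw [hsplit, List.foldl_append, ih, List.foldl_cons, List.foldl_nil]
    have hmod : PySem.Int.mod ((k : Int) + 1) 2 = (((k + 1) % 2 : Nat) : Int) := by
      have := PySem.Int.mod_natCast (k + 1) 2
      push_cast at this ⊢; omega
    have hfA : fA (k + 1) n = 3 * fA k n + (-1 : Int) ^ (k + 1 + 1) * Ps k n
        + (-1 : Int) ^ (PySem.Int.mod n 2).toNat * PySem.Int.mod ((k : Int) + 1) 2 := by
      have := fA_rec (k + 1) n (by omega)
      simpa using this
    have hPs : Ps (k + 1) n = Ps k n + (-1 : Int) ^ k * fA k n := rfl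
    rw [hfA, hPs, sg_eq, hmod]
    rcases Nat.mod_two_eq_zero_or_one k with hk | hk
    · have h1 : (k + 1) % 2 = 1 := by omega
      have p2 : (-1 : Int) ^ (k + 1 + 1) = 1 := by rw [neg_one_pow_ite]; simp [Nat.add_mod, hk]
      have p3 : (-1 : Int) ^ k = 1 := by rw [neg_one_pow_ite]; simp [hk]
      rw [h1, p2, p3]
      push_cast
      simp only [Prod.mk.injEq]
      constructor <;> ring
    · have h1 : (k + 1) % 2 = 0 := by omega
      have p2 : (-1 : Int) ^ (k + 1 + 1) = -1 := by rw [neg_one_pow_ite]; simp [Nat.add_mod, hk]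
      have p3 : (-1 : Int) ^ k = -1 := by rw [neg_one_pow_ite]; simp [hk]
      rw [h1, p2, p3]
      push_cast
      simp only [Prod.mk.injEq]
      constructor <;> ring

-- ===== VERDICT (by name: the statement is the Claim_ definition above) =====
theorem f_spec : Claim_equal_f := by
  intro m n _ hpre
  unfold Spec_f
  simp only [f, f_alt]
  have hm : (m.toNat : Int) = m := Int.toNat_of_nonneg hpre
  rw [show m + 1 = (m.toNat : Int) + 1 by rw [hm], loop_inv n m.toNat]
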